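-- pv_equiv track=rewrite | github.com/yassataiseer/competitive-programming | Mock-CCC/S1-WAR.py | solve
-- ===== SOURCE A (Python) =====
-- def solve(p1,p2):
--     answer = 0
--     war = False
--     for i in range(len(p1)):
--         if int(p1[i])==int(p2[i]) and war==False:
--             answer+=1
--             war = True
--         elif int(p1[i])==int(p2[i]) and war==True:
--             pass
--         elif int(p1[i])!=int(p2[i]) and war==True:
--             war = False
--
--     return answer
-- ===== SOURCE B (Python) =====
-- def solve(p1, p2):
--     eq = [int(p1[i]) == int(p2[i]) for i in range(len(p1))]
--     return sum(1 for prev, cur in zip([False] + eq, eq) if cur and not prev)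
-- ===== Notes on version B (the rewrite author's own statement) =====
-- stated objective: simpler
-- what changed: Replaces the explicit war-flag state machine with a two-stage decomposition: build the list of per-index equality booleans, then count rising edges by zipping it with a shifted copy.
import Mathlib
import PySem

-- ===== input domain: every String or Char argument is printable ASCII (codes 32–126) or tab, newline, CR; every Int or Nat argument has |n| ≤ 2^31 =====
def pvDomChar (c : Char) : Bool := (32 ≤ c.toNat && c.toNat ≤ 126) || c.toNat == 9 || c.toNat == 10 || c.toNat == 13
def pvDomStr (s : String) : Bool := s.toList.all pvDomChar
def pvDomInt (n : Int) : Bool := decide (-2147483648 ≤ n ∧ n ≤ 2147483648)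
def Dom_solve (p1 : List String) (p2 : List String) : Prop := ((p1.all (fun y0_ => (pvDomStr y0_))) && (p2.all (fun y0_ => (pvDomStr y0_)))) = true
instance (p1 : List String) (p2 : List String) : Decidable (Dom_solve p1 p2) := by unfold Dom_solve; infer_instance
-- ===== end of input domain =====

-- B replaces A's war-flag state machine by building the list of equality booleans and counting rising edges via a shifted zip (simpler decomposition, same O(n)).


-- ===== PORT A =====
-- int(xs[i]) for an in-range index i; Pre_solve guarantees the index is in range and the string parses, so getD defaults are never hit there
def pvInt (xs : List String) (i : Nat) : Int :=
  (PySem.Int.ofStr? (xs.getD i "")).getD 0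

def solve (p1 : List String) (p2 : List String) : Int :=
  (List.foldl
    (fun (st : Int × Bool) (i : Nat) =>
      if (pvInt p1 i == pvInt p2 i) && (st.2 == false) then (st.1 + 1, true)
      else if (pvInt p1 i == pvInt p2 i) && (st.2 == true) then st
      else if (!(pvInt p1 i == pvInt p2 i)) && (st.2 == true) then (st.1, false)
      else st)
    (0, false) (List.range p1.length)).1

-- ===== PORT B =====
def solve_alt (p1 : List String) (p2 : List String) : Int :=
  let eq := (List.range p1.length).map (fun i => pvInt p1 i == pvInt p2 i)
  (((List.zip (false :: eq) eq).filter (fun pc => pc.2 && !pc.1)).length : Int)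

-- ===== PRECONDITION & SPEC =====
-- Pre_: exactly where Python A returns normally — p2 long enough (else IndexError) and every string read parses as int (else ValueError)
def Pre_solve (p1 : List String) (p2 : List String) : Prop :=
  p1.length ≤ p2.length ∧
  (∀ s ∈ p1, (PySem.Int.ofStr? s).isSome = true) ∧
  (∀ s ∈ p2.take p1.length, (PySem.Int.ofStr? s).isSome = true)
instance (p1 : List String) (p2 : List String) : Decidable (Pre_solve p1 p2) := by unfold Pre_solve; infer_instance

def pvWitness_solve : List String × List String := (["1", "2", "3"], ["1", "5", "3"])

def Spec_solve (p1 : List String) (p2 : List String) (out : Int) : Prop := out = solve_alt p1 p2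
instance (p1 : List String) (p2 : List String) (out : Int) : Decidable (Spec_solve p1 p2 out) := by unfold Spec_solve; infer_instance

-- ===== CLAIM (what is proved, stated in full; the proofs are below) =====
def Claim_equal_solve : Prop := ∀ (p1 : List String) (p2 : List String), Dom_solve p1 p2 → Pre_solve p1 p2 → Spec_solve p1 p2 (solve p1 p2)

-- ===== LEMMAS AND PROOFS =====

-- A's loop body as a function of the boolean comparison
def pvStep (st : Int × Bool) (b : Bool) : Int × Bool :=
  if b && (st.2 == false) then (st.1 + 1, true)
  else if b && (st.2 == true) then st
  else if (!b) && (st.2 == true) then (st.1, false)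
  else st

theorem pvStep_eq (a : Int) (w b : Bool) :
    pvStep (a, w) b = (a + (if b && !w then 1 else 0), b) := by
  cases b <;> cases w <;> simp [pvStep]

theorem foldl_pvStep (bs : List Bool) (a : Int) (w : Bool) :
    (List.foldl pvStep (a, w) bs).1
      = a + (((List.zip (w :: bs) bs).filter (fun pc => pc.2 && !pc.1)).length : Int) := by
  induction bs generalizing a w with
  | nil => simp
  | cons b bs ih =>
    rw [List.foldl_cons, pvStep_eq]
    cases b <;> cases w <;>
      simp [ih, List.zip] <;> omega

theorem solve_spec : Claim_equal_solve := by
  intro p1 p2 _ _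
  unfold Spec_solve solve_alt solve
  rw [show (fun (st : Int × Bool) (i : Nat) =>
      if (pvInt p1 i == pvInt p2 i) && (st.2 == false) then (st.1 + 1, true)
      else if (pvInt p1 i == pvInt p2 i) && (st.2 == true) then st
      else if (!(pvInt p1 i == pvInt p2 i)) && (st.2 == true) then (st.1, false)
      else st)
    = (fun st i => pvStep st (pvInt p1 i == pvInt p2 i)) from rfl,
    ← List.foldl_map, foldl_pvStep]
  simp
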